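-- pv_equiv track=rewrite | github.com/lancenewman/advent-of-code | 2022/08/solution.py | calculate_scenic_scores
-- ===== SOURCE A (Python) =====
-- from typing import List, Tuple
--
-- def calculate_scenic_score(target: int, subset: List[int]) -> int:
--     score = 0
--     for elem in subset:
--         score = score + 1
--         if elem >= target:
--             break
--     return score
--
-- def calculate_scenic_scores(grid: List[List[int]]) -> int:
--     # init empty score array of same size as grid
--     scores = [[0 for _ in range(len(grid[0]))] for _ in range(len(grid))]
--
--     for i, row in enumerate(grid):
--         for j, tree in enumerate(row):
--             look_left = calculate_scenic_score(tree, reversed(row[:j]))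
--             look_right = calculate_scenic_score(tree, row[j+1:])
--             look_up = calculate_scenic_score(tree, reversed([r[j] for r in grid[:i]]))
--             look_down = calculate_scenic_score(tree, [r[j] for r in grid[i+1:]])
--             scores[i][j] = look_left * look_right * look_up * look_down
--     return scores
-- ===== SOURCE B (Python) =====
-- from typing import List
--
--
-- def calculate_scenic_scores(grid: List[List[int]]) -> int:
--     # Monotonic-stack sweep: one forward and one backward pass per row and per
--     # column, each O(length), instead of re-scanning the whole line per cell.
--     def pass_line(hs):
--         # dists[p] = how far tree p sees looking back toward index 0
--         out = []
--         stack = []  # (position, height), heights non-increasing bottom-to-top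
--         for pos, h in enumerate(hs):
--             while stack and stack[-1][1] < h:
--                 stack.pop()
--             out.append(pos - stack[-1][0] if stack else pos)
--             stack.append((pos, h))
--         return out
--
--     def both(hs):
--         fw = pass_line(hs)
--         bw = pass_line(hs[::-1])[::-1]
--         return [a * b for a, b in zip(fw, bw)]
--
--     horiz = [both(row) for row in grid]
--     vert = [both(list(col)) for col in zip(*grid)]
--     return [[horiz[i][j] * vert[j][i] for j in range(len(grid[0]))]
--             for i in range(len(grid))]
-- ===== Notes on version B (the rewrite author's own statement) =====
-- stated objective: faster
-- what changed: A rescans the whole row and column for every cell (4 linear scans per cell); B makes one forward and one backward monotonic-stack sweep per row and per column, computing every cell's four viewing distances in amortized O(1), plus a zip(*grid) transpose for the columns.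
import Mathlib
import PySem

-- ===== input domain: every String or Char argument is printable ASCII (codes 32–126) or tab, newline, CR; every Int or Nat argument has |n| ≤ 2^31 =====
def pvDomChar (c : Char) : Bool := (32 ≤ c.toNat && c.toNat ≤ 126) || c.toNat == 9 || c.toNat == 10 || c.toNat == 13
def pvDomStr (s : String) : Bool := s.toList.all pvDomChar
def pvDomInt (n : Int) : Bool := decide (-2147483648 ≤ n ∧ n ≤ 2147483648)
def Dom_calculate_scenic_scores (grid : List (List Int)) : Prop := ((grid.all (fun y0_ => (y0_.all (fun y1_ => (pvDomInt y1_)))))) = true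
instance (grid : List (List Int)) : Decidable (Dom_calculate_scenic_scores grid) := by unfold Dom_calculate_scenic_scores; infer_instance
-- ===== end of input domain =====

-- B replaces A's per-cell rescans of the whole row/column with one forward and one
-- backward monotonic-stack sweep per row and per column (asymptotically faster).

-- ===== PORT A =====
-- the for-loop of calculate_scenic_score with its break, score as accumulator
def calc_score_loop (target : Int) : List Int → Int → Int
  | [], score => score
  | elem :: rest, score =>
      let score := score + 1
      if elem ≥ target then score else calc_score_loop target rest score

def calculate_scenic_score (target : Int) (subset : List Int) : Int :=
  calc_score_loop target subset 0

-- A fills a zero matrix cell by cell in row-major order, each cell written exactly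
-- once, so the double loop is transcribed as nested maps over enumerate.
-- pyGetD (r[j] in the column comprehensions) is exact on the rectangular grids Pre_ admits.
def calculate_scenic_scores (grid : List (List Int)) : List (List Int) :=
  (PySem.List.enumerate grid).map (fun irow =>
    (PySem.List.enumerate irow.2).map (fun jtree =>
      let i := irow.1; let row := irow.2
      let j := jtree.1; let tree := jtree.2
      let look_left := calculate_scenic_score tree (PySem.List.slice row none (some j)).reverse
      let look_right := calculate_scenic_score tree (PySem.List.slice row (some (j + 1)) none)
      let look_up := calculate_scenic_score tree
        ((PySem.List.slice grid none (some i)).map (fun r => PySem.List.pyGetD r j 0)).reverse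
      let look_down := calculate_scenic_score tree
        ((PySem.List.slice grid (some (i + 1)) none).map (fun r => PySem.List.pyGetD r j 0))
      look_left * look_right * look_up * look_down))

-- ===== PORT B =====
-- pass_line: one sweep with a monotonic stack of (position, height), top first
def pass_line (hs : List Int) : List Int :=
  (hs.foldl
    (fun (st : List (Int × Int) × Int × List Int) h =>
      let stack := (st.1).dropWhile (fun q => q.2 < h)      -- while stack and stack[-1][1] < h: pop
      let pos := st.2.1
      let d := match stack with | [] => pos | (p, _) :: _ => pos - p
      ((pos, h) :: stack, pos + 1, st.2.2 ++ [d]))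
    ([], 0, [])).2.2

def both_line (hs : List Int) : List Int :=
  let fw := pass_line hs
  let bw := (pass_line hs.reverse).reverse                  -- pass_line(hs[::-1])[::-1]
  (fw.zip bw).map (fun ab => ab.1 * ab.2)

-- zip(*grid): truncates at the shortest row; first row's length bounds the rounds
def zipStar_go : Nat → List (List Int) → List (List Int)
  | 0, _ => []
  | n + 1, rows =>
      if rows.all (fun r => !r.isEmpty) then
        rows.map (fun r => r.headD 0) :: zipStar_go n (rows.map List.tail)
      else []

def zipStar (rows : List (List Int)) : List (List Int) :=
  match rows with
  | [] => []
  | r0 :: _ => zipStar_go r0.length rows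

-- getD indexing is exact here: on the rectangular grids Pre_ admits every index is in range
def calculate_scenic_scores_alt (grid : List (List Int)) : List (List Int) :=
  let horiz := grid.map both_line
  let vert := (zipStar grid).map both_line
  (List.range grid.length).map (fun i =>
    (List.range (grid.headD []).length).map (fun j =>
      ((horiz.getD i []).getD j 0) * ((vert.getD j []).getD i 0)))

-- ===== PRECONDITION & SPEC =====
-- A raises IndexError exactly on non-rectangular grids (some row's length differs from
-- the first row's): a column comprehension r[j] or the write scores[i][j] goes out of range.
def Pre_calculate_scenic_scores (grid : List (List Int)) : Prop :=
  ∀ row ∈ grid, row.length = (grid.headD []).length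

instance (grid : List (List Int)) : Decidable (Pre_calculate_scenic_scores grid) := by
  unfold Pre_calculate_scenic_scores; infer_instance

def pvWitness_calculate_scenic_scores : List (List Int) := [[3, 0, 3], [2, 5, 1], [6, 5, 3]]

def Spec_calculate_scenic_scores (grid : List (List Int)) (out : List (List Int)) : Prop := out = calculate_scenic_scores_alt grid
instance (grid : List (List Int)) (out : List (List Int)) : Decidable (Spec_calculate_scenic_scores grid out) := by unfold Spec_calculate_scenic_scores; infer_instance

-- ===== CLAIM (what is proved, stated in full; the proofs are below) =====
def Claim_equal_calculate_scenic_scores : Prop := ∀ (grid : List (List Int)), Dom_calculate_scenic_scores grid → Pre_calculate_scenic_scores grid → Spec_calculate_scenic_scores grid (calculate_scenic_scores grid)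

-- ===== LEMMAS AND PROOFS =====

-- viewing distance of a tree of height h looking back over the line prefix `pre`
def vdist (h : Int) (pre : List Int) : Int := calc_score_loop h pre.reverse 0

-- the stack pass_line's loop holds after consuming `pre`, as a cons-recursion on pre.reverse
def sOfR : List Int → List (Int × Int)
  | [] => []
  | h :: rest => ((rest.length : Int), h) :: (sOfR rest).dropWhile (fun q => q.2 < h)

def sOf (pre : List Int) : List (Int × Int) := sOfR pre.reverse

-- the distances pass_line emits for `hs` after prefix `pre`
def distsFrom (pre : List Int) : List Int → List Int
  | [] => []
  | h :: rest => vdist h pre :: distsFrom (pre ++ [h]) rest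

lemma calc_score_loop_acc (t : Int) (xs : List Int) (s : Int) :
    calc_score_loop t xs s = s + calc_score_loop t xs 0 := by
  induction xs generalizing s with
  | nil => simp [calc_score_loop]
  | cons e rest ih =>
      simp only [calc_score_loop]
      split_ifs with he
      · ring
      · rw [ih (s + 1), ih (0 + 1)]; ring

lemma dropWhile_dropWhile (l : List (Int × Int)) (e h : Int) (he : e < h) :
    (l.dropWhile (fun q => q.2 < e)).dropWhile (fun q => q.2 < h)
      = l.dropWhile (fun q => q.2 < h) := by
  induction l with
  | nil => simp
  | cons q rest ih =>
      by_cases hq : q.2 < e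
      · have hqh : q.2 < h := hq.trans he
        simp [hq, hqh, ih]
      · simp [List.dropWhile_cons, hq]

-- the stack's answer is the naive backward viewing distance
lemma stack_dist (rpre : List Int) (h : Int) :
    (match (sOfR rpre).dropWhile (fun q => q.2 < h) with
      | [] => ((rpre.length : Nat) : Int)
      | (p, _) :: _ => (rpre.length : Int) - p)
      = calc_score_loop h rpre 0 := by
  induction rpre with
  | nil => simp [sOfR, calc_score_loop]
  | cons e rest ih =>
      by_cases hcase : e ≥ h
      · have : ¬ (e < h) := not_lt.mpr hcase
        simp [sOfR, calc_score_loop, this, hcase]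
      · have hlt : e < h := lt_of_not_ge hcase
        rw [calc_score_loop]
        simp only [sOfR, List.dropWhile_cons, decide_eq_true_eq, if_pos hlt,
          dropWhile_dropWhile _ _ _ hlt, if_neg hcase]
        rw [calc_score_loop_acc, ← ih]
        rcases hd : (sOfR rest).dropWhile (fun q => q.2 < h) with _ | ⟨⟨p, ph⟩, tl⟩ <;>
          rw [hd] <;> push_cast [List.length_cons] <;> ring

lemma sOf_append (pre : List Int) (h : Int) :
    sOf (pre ++ [h]) = ((pre.length : Int), h) :: (sOf pre).dropWhile (fun q => q.2 < h) := by
  simp [sOf, sOfR, List.reverse_append]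

lemma pass_loop (hs : List Int) : ∀ (pre out : List Int),
    (hs.foldl
      (fun (st : List (Int × Int) × Int × List Int) h =>
        let stack := (st.1).dropWhile (fun q => q.2 < h)
        let pos := st.2.1
        let d := match stack with | [] => pos | (p, _) :: _ => pos - p
        ((pos, h) :: stack, pos + 1, st.2.2 ++ [d]))
      (sOf pre, (pre.length : Int), out))
    = (sOf (pre ++ hs), ((pre.length + hs.length : Nat) : Int), out ++ distsFrom pre hs) := by
  induction hs with
  | nil => intro pre out; simp [distsFrom]
  | cons h rest ih =>
      intro pre out
      have hd := stack_dist pre.reverse h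
      simp only [List.length_reverse] at hd
      rw [List.foldl_cons]
      have hstack : (sOf pre).dropWhile (fun q => q.2 < h)
          = (sOfR pre.reverse).dropWhile (fun q => q.2 < h) := rfl
      have hdist : (match (sOf pre).dropWhile (fun q => q.2 < h) with
          | [] => ((pre.length : Nat) : Int)
          | (p, _) :: _ => (pre.length : Int) - p) = vdist h pre := by
        rw [hstack, hd]; rfl
      simp only []
      rw [hdist, ← sOf_append]
      have := ih (pre ++ [h]) (out ++ [vdist h pre])
      simp only [List.length_append, List.length_singleton] at this
      rw [show ((pre.length : Int) + 1) = (((pre.length + 1 : Nat)) : Int) by push_cast; ring]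
      rw [this]
      have hn : pre.length + 1 + rest.length = pre.length + (h :: rest).length := by
        simp; omega
      have hL : pre ++ [h] ++ rest = pre ++ h :: rest := by simp
      have hO : out ++ [vdist h pre] ++ distsFrom (pre ++ [h]) rest
          = out ++ distsFrom pre (h :: rest) := by
        simp [distsFrom]
      rw [hL, hn, hO]

lemma pass_line_eq (hs : List Int) : pass_line hs = distsFrom [] hs := by
  have h0 : (sOf [] , ((List.length ([] : List Int) : Nat) : Int), ([] : List Int))
      = (([] : List (Int × Int)), (0 : Int), ([] : List Int)) := rfl
  unfold pass_line
  rw [← h0, pass_loop hs [] []]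
  simp

lemma length_distsFrom (hs pre : List Int) : (distsFrom pre hs).length = hs.length := by
  induction hs generalizing pre with
  | nil => simp [distsFrom]
  | cons h rest ih => simp [distsFrom, ih]

lemma distsFrom_getD (hs : List Int) : ∀ (pre : List Int) (j : Nat), j < hs.length →
    (distsFrom pre hs).getD j 0 = vdist (hs.getD j 0) (pre ++ hs.take j) := by
  induction hs with
  | nil => intro pre j hj; simp at hj
  | cons h rest ih =>
      intro pre j hj
      cases j with
      | zero => simp [distsFrom]
      | succ j =>
          simp only [distsFrom, List.getD_cons_succ, List.take_succ_cons, List.getD_cons_succ]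
          rw [ih (pre ++ [h]) j (by simpa using hj)]
          simp [List.append_assoc]

def lineScore (hs : List Int) (p : Nat) : Int :=
  vdist (hs.getD p 0) (hs.take p) * calc_score_loop (hs.getD p 0) (hs.drop (p + 1)) 0

lemma both_line_getD (hs : List Int) (p : Nat) (hp : p < hs.length) :
    (both_line hs).getD p 0 = lineScore hs p := by
  have hfw : (pass_line hs).length = hs.length := by
    rw [pass_line_eq]; exact length_distsFrom hs []
  have hlrev : (pass_line hs.reverse).length = hs.length := by
    rw [pass_line_eq, length_distsFrom]; simp
  have hbw : ((pass_line hs.reverse).reverse).length = hs.length := by simp [hlrev]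
  unfold both_line
  simp only []
  rw [List.getD_eq_getElem _ _ (by simp [hfw, hbw]; omega)]
  rw [List.getElem_map, List.getElem_zip]
  have hfwv : (pass_line hs)[p]'(by omega) = vdist (hs.getD p 0) (hs.take p) := by
    rw [← List.getD_eq_getElem _ 0 (by omega), pass_line_eq, distsFrom_getD hs [] p hp]
    simp
  have hbwv : ((pass_line hs.reverse).reverse)[p]'(by omega)
      = calc_score_loop (hs.getD p 0) (hs.drop (p + 1)) 0 := by
    rw [List.getElem_reverse]
    rw [← List.getD_eq_getElem _ 0 (by omega), hlrev, pass_line_eq,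
      distsFrom_getD hs.reverse [] _ (by simp; omega)]
    rw [List.nil_append]
    have h1 : hs.reverse.getD (hs.length - 1 - p) 0 = hs.getD p 0 := by
      rw [List.getD_eq_getElem _ _ (by simp; omega), List.getD_eq_getElem _ _ hp,
        List.getElem_reverse]
      congr 1
      omega
    have h2 : (hs.reverse.take (hs.length - 1 - p)).reverse = hs.drop (p + 1) := by
      rw [List.take_reverse, List.reverse_reverse]
      congr 1
      omega
    rw [h1]
    unfold vdist
    rw [h2]
  rw [hfwv, hbwv]
  rfl

lemma zipStar_go_eq (L : Nat) : ∀ (rows : List (List Int)), (∀ r ∈ rows, r.length = L) →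
    zipStar_go L rows = (List.range L).map (fun j => rows.map (fun r => r.getD j 0)) := by
  induction L with
  | zero => intro rows _; simp [zipStar_go]
  | succ L ih =>
      intro rows hlen
      have hne : rows.all (fun r => !r.isEmpty) = true := by
        rw [List.all_eq_true]
        intro r hr
        have := hlen r hr
        cases r with
        | nil => simp at this
        | cons a l => simp
      rw [zipStar_go, if_pos hne]
      rw [ih (rows.map List.tail) (by
        intro r hr
        rcases List.mem_map.mp hr with ⟨r0, hr0, rfl⟩
        have := hlen r0 hr0
        cases r0 with
        | nil => simp at this
        | cons a l => simpa using this)]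
      rw [List.range_succ_eq_map]
      simp only [List.map_cons, List.map_map]
      congr 1
      · exact List.map_congr_left (fun r _ => by cases r <;> rfl)
      · refine List.map_congr_left (fun j _ => ?_)
        simp only [Function.comp]
        exact List.map_congr_left (fun r _ => by cases r <;> simp)

lemma zipStar_eq (grid : List (List Int)) (hpre : ∀ r ∈ grid, r.length = (grid.headD []).length) :
    zipStar grid = (List.range (grid.headD []).length).map
      (fun j => grid.map (fun r => r.getD j 0)) := by
  cases grid with
  | nil => simp [zipStar]
  | cons r0 rest =>
      simp only [List.headD_cons] at hpre ⊢
      exact zipStar_go_eq r0.length (r0 :: rest) hpre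

-- ===== VERDICT (by name: the statement is the Claim_ definition above) =====
theorem calculate_scenic_scores_spec : Claim_equal_calculate_scenic_scores := by
  intro grid _ hpre
  unfold Spec_calculate_scenic_scores
  unfold Pre_calculate_scenic_scores at hpre
  simp only [calculate_scenic_scores, calculate_scenic_scores_alt]
  rw [zipStar_eq grid hpre]
  apply List.ext_getElem
  · simp [PySem.List.length_enumerate]
  intro i h1 h2
  rw [List.getElem_map, List.getElem_map, PySem.List.getElem_enumerate, List.getElem_range]
  have hi : i < grid.length := by simpa [PySem.List.length_enumerate] using h2
  have hrow : grid[i].length = (grid.headD []).length :=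
    hpre grid[i] (List.getElem_mem hi)
  apply List.ext_getElem
  · simp [PySem.List.length_enumerate, hrow]
  intro j g1 g2
  have hj : j < (grid.headD []).length := by simpa using g2
  have hjr : j < grid[i].length := by omega
  rw [List.getElem_map, List.getElem_map, PySem.List.getElem_enumerate, List.getElem_range]
  simp only [zero_add]
  -- A-side slices as take/drop
  have hjc : ((j : Int) + 1) = (((j + 1 : Nat) : Nat) : Int) := by push_cast; ring
  have hic : ((i : Int) + 1) = (((i + 1 : Nat) : Nat) : Int) := by push_cast; ring
  rw [PySem.List.slice_to_natCast, hjc, PySem.List.slice_from_natCast,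
    PySem.List.slice_to_natCast, hic, PySem.List.slice_from_natCast]
  simp only [PySem.List.pyGetD_natCast]
  -- B-side indexing
  have hcol : ∀ (r : List (List Int)) (F : List Int → List Int) (hi' : i < r.length),
      (r.map F).getD i [] = F r[i] := by
    intro r F hi'
    rw [List.getD_eq_getElem _ _ (by simpa using hi'), List.getElem_map]
  rw [hcol grid both_line hi]
  have hvert : (((List.range (grid.headD []).length).map
        (fun j => grid.map (fun r => r.getD j 0))).map both_line).getD j []
      = both_line (grid.map (fun r => r.getD j 0)) := by
    rw [List.getD_eq_getElem _ _ (by simpa using hj), List.getElem_map, List.getElem_map,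
      List.getElem_range]
  rw [hvert]
  rw [both_line_getD grid[i] j hjr,
    both_line_getD (grid.map (fun r => r.getD j 0)) i (by simpa using hi)]
  unfold lineScore vdist calculate_scenic_score
  have hg1 : (grid.map (fun r => r.getD j 0)).getD i 0 = grid[i].getD j 0 := by
    rw [List.getD_eq_getElem _ _ (by simpa using hi), List.getElem_map]
  have hg2 : grid[i].getD j 0 = grid[i][j] := List.getD_eq_getElem _ _ hjr
  rw [hg1, hg2]
  rw [List.map_take, List.map_drop]
  ring
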